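-- pv_equiv track=rewrite | github.com/Monarch428/BrandingBeez-official | ai_engine/app/pipeline/report_data_validation.py | _has_actual_company_data
-- ===== SOURCE A (Python) =====
-- from typing import Any, Dict, List, Sequence, Tuple
--
-- def _has_actual_company_data(user_financials: Dict[str, Any]) -> bool:
--     numeric_fields = [
--         "monthly_payroll",
--         "monthly_overhead",
--         "monthly_tools_cost",
--         "monthly_marketing_cost",
--         "current_monthly_revenue",
--         "avg_deal_size",
--         "close_rate",
--         "monthly_traffic",
--         "site_conversion_rate",
--         "monthly_leads",
--         "implementation_cost",
--     ]
--     present = sum(1 for key in numeric_fields if user_financials.get(key) is not None)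
--     cost_present = any(user_financials.get(key) is not None for key in ("monthly_payroll", "monthly_overhead", "monthly_tools_cost", "monthly_marketing_cost"))
--     revenue_present = user_financials.get("current_monthly_revenue") is not None
--     funnel_present = sum(
--         1
--         for key in ("monthly_traffic", "site_conversion_rate", "avg_deal_size", "close_rate", "monthly_leads")
--         if user_financials.get(key) is not None
--     )
--     return present >= 3 or (cost_present and revenue_present) or funnel_present >= 3
-- ===== SOURCE B (Python) =====
-- _FIELD_MASK = {
--     "monthly_payroll": 1,
--     "monthly_overhead": 2,
--     "monthly_tools_cost": 4,
--     "monthly_marketing_cost": 8,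
--     "current_monthly_revenue": 16,
--     "avg_deal_size": 32,
--     "close_rate": 64,
--     "monthly_traffic": 128,
--     "site_conversion_rate": 256,
--     "monthly_leads": 512,
--     "implementation_cost": 1024,
-- }
-- _COST_MASK = 1 | 2 | 4 | 8
-- _REVENUE_MASK = 16
-- _FUNNEL_MASK = 32 | 64 | 128 | 256 | 512
--
--
-- def _has_actual_company_data(user_financials):
--     # One pass over the dict: fold the present fields into an 11-bit mask,
--     # then answer with popcounts and mask tests.
--     mask = 0
--     for key in user_financials:
--         w = _FIELD_MASK.get(key)
--         if w is not None and user_financials.get(key) is not None: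
--             mask |= w
--     if mask.bit_count() >= 3:
--         return True
--     if mask & _COST_MASK and mask & _REVENUE_MASK:
--         return True
--     return (mask & _FUNNEL_MASK).bit_count() >= 3
-- ===== Notes on version B (the rewrite author's own statement) =====
-- stated objective: alternative
-- what changed: B folds the dict once into an 11-bit presence bitmask (one power-of-two weight per field) and decides with popcounts and mask tests, instead of A's four separate generator scans over hard-coded field-name lists.
import Mathlib
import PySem

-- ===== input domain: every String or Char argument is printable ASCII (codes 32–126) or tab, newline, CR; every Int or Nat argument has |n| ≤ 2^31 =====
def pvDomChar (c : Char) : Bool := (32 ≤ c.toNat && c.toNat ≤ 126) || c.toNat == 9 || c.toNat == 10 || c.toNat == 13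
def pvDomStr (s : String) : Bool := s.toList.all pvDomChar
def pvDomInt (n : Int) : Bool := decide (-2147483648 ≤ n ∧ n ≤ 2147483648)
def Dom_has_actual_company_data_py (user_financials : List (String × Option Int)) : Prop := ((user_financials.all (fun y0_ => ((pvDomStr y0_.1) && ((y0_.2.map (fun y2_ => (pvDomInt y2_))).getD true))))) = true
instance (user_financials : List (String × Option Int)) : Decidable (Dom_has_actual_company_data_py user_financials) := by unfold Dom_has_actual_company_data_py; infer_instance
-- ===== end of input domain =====

-- B folds the dict ONCE into an 11-bit presence bitmask (one power-of-two weight per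
-- field) and decides with popcounts and mask tests, instead of A's four staged scans.

-- shared model of `user_financials.get(key) is not None` (dict lookup = first match)
def pget (d : List (String × Option Int)) (k : String) : Bool :=
  match (PySem.Dict.mk d).get? k with
  | some (some _) => true
  | _ => false

-- ===== PORT A =====
def has_actual_company_data_py (user_financials : List (String × Option Int)) : Bool :=
  let numeric_fields : List String :=
    ["monthly_payroll", "monthly_overhead", "monthly_tools_cost", "monthly_marketing_cost",
     "current_monthly_revenue", "avg_deal_size", "close_rate", "monthly_traffic",
     "site_conversion_rate", "monthly_leads", "implementation_cost"]
  let present : Int :=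
    numeric_fields.foldl (fun acc k => if pget user_financials k then acc + 1 else acc) 0
  let cost_present : Bool :=
    (["monthly_payroll", "monthly_overhead", "monthly_tools_cost", "monthly_marketing_cost"] : List String).any
      (fun k => pget user_financials k)
  let revenue_present : Bool := pget user_financials "current_monthly_revenue"
  let funnel_present : Int :=
    (["monthly_traffic", "site_conversion_rate", "avg_deal_size", "close_rate", "monthly_leads"] : List String).foldl
      (fun acc k => if pget user_financials k then acc + 1 else acc) 0
  decide (present ≥ 3) || (cost_present && revenue_present) || decide (funnel_present ≥ 3)

-- ===== PORT B =====
-- the constant dict _FIELD_MASK of Source B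
def pvFieldMask : List (String × Int) :=
  [("monthly_payroll", 1), ("monthly_overhead", 2), ("monthly_tools_cost", 4),
   ("monthly_marketing_cost", 8), ("current_monthly_revenue", 16), ("avg_deal_size", 32),
   ("close_rate", 64), ("monthly_traffic", 128), ("site_conversion_rate", 256),
   ("monthly_leads", 512), ("implementation_cost", 1024)]

-- _FIELD_MASK.get(key)
def pvFieldMaskGet (k : String) : Option Int := (PySem.Dict.mk pvFieldMask).get? k

-- the loop: for key in d: w = _FIELD_MASK.get(key); if w is not None and d.get(key) is not None: mask |= w
def pvMaskOf (d : List (String × Option Int)) : Int :=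
  d.foldl (fun mask kv =>
    match pvFieldMaskGet kv.1 with
    | some w => if pget d kv.1 then PySem.Int.bor mask w else mask
    | none => mask) 0

-- the tail of Source B after the loop (popcounts and mask tests)
def pvDecideMask (mask : Int) : Bool :=
  if PySem.Int.bitCount mask ≥ 3 then true
  else if PySem.Int.band mask 15 ≠ 0 ∧ PySem.Int.band mask 16 ≠ 0 then true
  else decide (PySem.Int.bitCount (PySem.Int.band mask 992) ≥ 3)

def has_actual_company_data_py_alt (user_financials : List (String × Option Int)) : Bool :=
  pvDecideMask (pvMaskOf user_financials)

-- ===== PRECONDITION & SPEC =====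
def Spec_has_actual_company_data_py (user_financials : List (String × Option Int)) (out : Bool) : Prop := out = has_actual_company_data_py_alt user_financials
instance (user_financials : List (String × Option Int)) (out : Bool) : Decidable (Spec_has_actual_company_data_py user_financials out) := by unfold Spec_has_actual_company_data_py; infer_instance

-- ===== CLAIM (what is proved, stated in full; the proofs are below) =====
def Claim_equal_has_actual_company_data_py : Prop := ∀ (user_financials : List (String × Option Int)), Dom_has_actual_company_data_py user_financials → Spec_has_actual_company_data_py user_financials (has_actual_company_data_py user_financials)

-- ===== LEMMAS AND PROOFS =====

-- A's result as a function of the presence of the 11 fields (literally A's body with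
-- `pget d ki` abstracted as a Bool; the bridge lemma below is rfl)
def pvAExpr (b0 b1 b2 b3 b4 b5 b6 b7 b8 b9 b10 : Bool) : Bool :=
  let present : Int :=
    List.foldl (fun acc b => if b then acc + 1 else acc) 0
      [b0, b1, b2, b3, b4, b5, b6, b7, b8, b9, b10]
  let cost_present : Bool := [b0, b1, b2, b3].any id
  let revenue_present : Bool := b4
  let funnel_present : Int :=
    List.foldl (fun acc b => if b then acc + 1 else acc) 0 [b7, b8, b5, b6, b9]
  decide (present ≥ 3) || (cost_present && revenue_present) || decide (funnel_present ≥ 3)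

-- the mask as a Nat, bits in _FIELD_MASK order
def pvNatBits (b0 b1 b2 b3 b4 b5 b6 b7 b8 b9 b10 : Bool) : Nat :=
  (if b0 then 1 else 0) ||| (if b1 then 2 else 0) ||| (if b2 then 4 else 0) |||
  (if b3 then 8 else 0) ||| (if b4 then 16 else 0) ||| (if b5 then 32 else 0) |||
  (if b6 then 64 else 0) ||| (if b7 then 128 else 0) ||| (if b8 then 256 else 0) |||
  (if b9 then 512 else 0) ||| (if b10 then 1024 else 0)

theorem pget_mem {d : List (String × Option Int)} {k : String}
    (h : pget d k = true) : k ∈ d.map Prod.fst := by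
  induction d with
  | nil => simp [pget, PySem.Dict.get?] at h
  | cons p t ih =>
      unfold pget at h
      rw [PySem.Dict.get?_mk_cons] at h
      by_cases he : p.1 = k
      · simp [he]
      · simp only [List.map_cons, List.mem_cons]
        right
        exact ih (by simpa [he, pget] using h)

theorem fieldMask_nonneg {k : String} {w : Int} (h : pvFieldMaskGet k = some w) : 0 ≤ w := by
  have hm : (k, w) ∈ pvFieldMask := PySem.Dict.mem_items_of_get?_eq_some _ h
  have : ∀ p ∈ pvFieldMask, 0 ≤ p.2 := by decide
  exact this _ hm

-- the Int fold equals the cast of the same fold over Nat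
theorem pvMask_cast (d : List (String × Option Int)) :
    ∀ (l : List (String × Option Int)) (m : Nat),
      l.foldl (fun mask kv =>
        match pvFieldMaskGet kv.1 with
        | some w => if pget d kv.1 then PySem.Int.bor mask w else mask
        | none => mask) (m : Int)
      = ((l.foldl (fun mask kv =>
          match pvFieldMaskGet kv.1 with
          | some w => if pget d kv.1 then mask ||| w.toNat else mask
          | none => mask) m : Nat) : Int) := by
  intro l
  induction l with
  | nil => intro m; rfl
  | cons a t ih =>
      intro m
      simp only [List.foldl_cons]
      cases hg : pvFieldMaskGet a.1 with
      | none => exact ih m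
      | some w =>
          by_cases hp : pget d a.1 = true
          · have hw : 0 ≤ w := fieldMask_nonneg hg
            have : PySem.Int.bor (m : Int) w = ((m ||| w.toNat : Nat) : Int) := by
              rw [PySem.Int.bor_of_nonneg (by positivity) hw]
              simp
            simp only [hp, if_true, this]
            exact ih _
          · simp only [hp]
            exact ih m

theorem pvMask_testBit (d : List (String × Option Int)) :
    ∀ (l : List (String × Option Int)) (m : Nat) (j : Nat),
      (l.foldl (fun mask kv =>
          match pvFieldMaskGet kv.1 with
          | some w => if pget d kv.1 then mask ||| w.toNat else mask
          | none => mask) m).testBit j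
      = (m.testBit j ||
         l.any (fun kv =>
           match pvFieldMaskGet kv.1 with
           | some w => pget d kv.1 && w.toNat.testBit j
           | none => false)) := by
  intro l
  induction l with
  | nil => intro m j; simp
  | cons a t ih =>
      intro m j
      simp only [List.foldl_cons, List.any_cons]
      cases hg : pvFieldMaskGet a.1 with
      | none => rw [ih]; simp
      | some w =>
          by_cases hp : pget d a.1 = true
          · simp only [hp, if_true, Bool.true_and]
            rw [ih, Nat.testBit_lor]
            cases m.testBit j <;> cases w.toNat.testBit j <;> simp
          · simp only [hp, Bool.false_and, Bool.false_or]
            exact ih m j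

-- the per-element any over d equals an any over the constant field list
theorem pvAny_fields (d : List (String × Option Int)) (j : Nat) :
    d.any (fun kv =>
        match pvFieldMaskGet kv.1 with
        | some w => pget d kv.1 && w.toNat.testBit j
        | none => false)
    = pvFieldMask.any (fun p => pget d p.1 && p.2.toNat.testBit j) := by
  rw [Bool.eq_iff_iff]
  simp only [List.any_eq_true]
  constructor
  · rintro ⟨kv, hkv, hc⟩
    cases hg : pvFieldMaskGet kv.1 with
    | none => rw [hg] at hc; exact absurd hc (by simp)
    | some w =>
        rw [hg] at hc
        exact ⟨(kv.1, w), PySem.Dict.mem_items_of_get?_eq_some _ hg, hc⟩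
  · rintro ⟨p, hp, hc⟩
    have hpg : pget d p.1 = true := by
      revert hc; cases pget d p.1 <;> simp
    obtain ⟨kv, hkv, hk1⟩ := List.mem_map.mp (pget_mem hpg)
    refine ⟨kv, hkv, ?_⟩
    have hg : pvFieldMaskGet kv.1 = some p.2 := by
      rw [hk1]
      exact PySem.Dict.get?_of_mem_items _ hp (by decide)
    rw [hg, hk1]
    exact hc

theorem pvIfBit_testBit (b : Bool) (n j : Nat) :
    ((if b then n else 0).testBit j) = (b && n.testBit j) := by
  cases b <;> simp

-- the Nat mask is exactly pvNatBits of the 11 presences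
theorem pvMask_eq (d : List (String × Option Int)) :
    pvMaskOf d
      = ((pvNatBits (pget d "monthly_payroll") (pget d "monthly_overhead")
          (pget d "monthly_tools_cost") (pget d "monthly_marketing_cost")
          (pget d "current_monthly_revenue") (pget d "avg_deal_size")
          (pget d "close_rate") (pget d "monthly_traffic")
          (pget d "site_conversion_rate") (pget d "monthly_leads")
          (pget d "implementation_cost") : Nat) : Int) := by
  unfold pvMaskOf
  have h0 : (0 : Int) = ((0 : Nat) : Int) := rfl
  rw [h0, pvMask_cast d d 0]
  congr 1
  apply Nat.eq_of_testBit_eq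
  intro j
  rw [pvMask_testBit d d 0 j, pvAny_fields d j]
  simp only [pvNatBits, Nat.testBit_lor, pvIfBit_testBit, pvFieldMask, List.any_cons,
    List.any_nil, Nat.zero_testBit, Bool.false_or, Bool.or_false]
  norm_num [Bool.or_assoc]
  rfl

-- A and B agree as functions of the 11 presence booleans (2^11 cases)
theorem pvTable : ∀ (b0 b1 b2 b3 b4 b5 b6 b7 b8 b9 b10 : Bool),
    pvAExpr b0 b1 b2 b3 b4 b5 b6 b7 b8 b9 b10
      = pvDecideMask ((pvNatBits b0 b1 b2 b3 b4 b5 b6 b7 b8 b9 b10 : Nat) : Int) := by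
  decide

theorem pvA_bridge (d : List (String × Option Int)) :
    has_actual_company_data_py d
      = pvAExpr (pget d "monthly_payroll") (pget d "monthly_overhead")
          (pget d "monthly_tools_cost") (pget d "monthly_marketing_cost")
          (pget d "current_monthly_revenue") (pget d "avg_deal_size")
          (pget d "close_rate") (pget d "monthly_traffic")
          (pget d "site_conversion_rate") (pget d "monthly_leads")
          (pget d "implementation_cost") := rfl

-- ===== VERDICT (by name: the statement is the Claim_ definition above) =====
theorem has_actual_company_data_py_spec : Claim_equal_has_actual_company_data_py := by
  intro d _
  unfold Spec_has_actual_company_data_py has_actual_company_data_py_alt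
  rw [pvA_bridge d, pvMask_eq d]
  exact pvTable _ _ _ _ _ _ _ _ _ _ _
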